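-- pv_equiv track=rewrite | github.com/drizztSun/common_project | PythonLeetcode/leetcodeM/1727_LargestSubmatrixWithRearrangements.py | doit_sort_dp
-- ===== SOURCE A (Python) =====
-- def doit_sort_dp(matrix: list) -> int:
--
--     heights = [0] * len(matrix[0])
--     ans = 0
--
--     for i in range(len(matrix)):
--
--         for j in range(len(matrix[0])):
--             heights[j] = (heights[j] + 1) if matrix[i][j] == 1 else 0
--
--         cnt = sorted(heights)
--
--         for i in range(len(cnt)):
--             ans = max(ans, cnt[i] * (len(cnt) - i))
--
--     return ans
-- ===== SOURCE B (Python) =====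
-- def doit_sort_dp(matrix: list) -> int:
--     # counting scan over bounded heights instead of sorting each row
--     n = len(matrix[0])
--     m = len(matrix)
--     heights = [0] * n
--     ans = 0
--     for row in matrix:
--         heights = [h + 1 if x == 1 else 0 for h, x in zip(heights, row)]
--         freq = {}
--         for h in heights:
--             freq[h] = freq.get(h, 0) + 1
--         k = 0
--         for h in range(m, 0, -1):
--             k += freq.get(h, 0)
--             ans = max(ans, h * k)
--     return ans
-- ===== Notes on version B (the rewrite author's own statement) =====
-- stated objective: alternative
-- what changed: Per row, A sorts the height array and scans sorted positions; B never sorts: it tallies height frequencies in a dict and scans the bounded height values m..1 once, accumulating the count of columns with height >= h (asymptotically O(m(n+m)) vs O(mn log n), but not measurably faster in CPython where sort runs in C).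
import Mathlib
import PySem

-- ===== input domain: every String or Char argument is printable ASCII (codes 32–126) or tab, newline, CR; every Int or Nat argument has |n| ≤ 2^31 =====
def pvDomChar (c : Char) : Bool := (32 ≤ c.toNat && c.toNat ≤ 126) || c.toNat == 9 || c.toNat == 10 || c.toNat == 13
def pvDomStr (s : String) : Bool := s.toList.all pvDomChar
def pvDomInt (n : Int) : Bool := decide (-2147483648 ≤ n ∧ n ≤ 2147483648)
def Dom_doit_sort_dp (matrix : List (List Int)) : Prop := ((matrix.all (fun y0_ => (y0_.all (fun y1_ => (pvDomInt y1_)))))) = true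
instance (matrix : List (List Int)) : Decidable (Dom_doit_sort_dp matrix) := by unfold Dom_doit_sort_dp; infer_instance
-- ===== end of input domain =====

-- B replaces A's per-row comparison sort (heights sorted each row, then a positional scan)
-- by a counting scan over the bounded height values 1..len(matrix); return values agree on Pre_.

-- ===== PORT A =====
def doit_sort_dp (matrix : List (List Int)) : Int :=
  let n := (PySem.List.pyGetD matrix 0 []).length
  let res : List Int × Int := (PySem.List.pyRange 0 (matrix.length : Int) 1).foldl
    (fun (st : List Int × Int) i =>
      let row := PySem.List.pyGetD matrix i []
      let heights := (PySem.List.pyRange 0 (n : Int) 1).foldl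
        (fun hts j =>
          hts.set j.toNat (if PySem.List.pyGetD row j 0 == 1 then PySem.List.pyGetD hts j 0 + 1 else 0))
        st.1
      let cnt := PySem.List.sorted heights (fun x => x) false
      let ans := (PySem.List.pyRange 0 (cnt.length : Int) 1).foldl
        (fun a i => max a (PySem.List.pyGetD cnt i 0 * ((cnt.length : Int) - i)))
        st.2
      (heights, ans))
    (List.replicate n 0, 0)
  res.2

-- ===== PORT B =====
def doit_sort_dp_alt (matrix : List (List Int)) : Int :=
  let n := (PySem.List.pyGetD matrix 0 []).length
  let m := (matrix.length : Int)
  let res : List Int × Int := matrix.foldl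
    (fun (st : List Int × Int) row =>
      let heights := (st.1.zip row).map (fun p => if p.2 == 1 then p.1 + 1 else 0)
      let freq := heights.foldl (fun d h => d.insert h (d.getD h 0 + 1)) (PySem.Dict.empty)
      let ka := (PySem.List.pyRange m 0 (-1)).foldl
        (fun (s : Int × Int) h =>
          let k := s.1 + freq.getD h 0
          (k, max s.2 (h * k)))
        (0, st.2)
      (heights, ka.2))
    (List.replicate n 0, 0)
  res.2

-- ===== PRECONDITION & SPEC =====
-- Pre_ excludes exactly the inputs on which A raises: the empty matrix (matrix[0] is an
-- IndexError) and matrices with a row shorter than row 0 (matrix[i][j] is an IndexError).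
def Pre_doit_sort_dp (matrix : List (List Int)) : Prop :=
  matrix ≠ [] ∧ ∀ row ∈ matrix, (matrix.headD []).length ≤ row.length
instance (matrix : List (List Int)) : Decidable (Pre_doit_sort_dp matrix) := by
  unfold Pre_doit_sort_dp; infer_instance
def pvWitness_doit_sort_dp : List (List Int) := [[1, 0, 1], [1, 1, 1], [0, 1, 1]]

def Spec_doit_sort_dp (matrix : List (List Int)) (out : Int) : Prop := out = doit_sort_dp_alt matrix
instance (matrix : List (List Int)) (out : Int) : Decidable (Spec_doit_sort_dp matrix out) := by
  unfold Spec_doit_sort_dp; infer_instance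

-- ===== CLAIM (what is proved, stated in full; the proofs are below) =====
def Claim_equal_doit_sort_dp : Prop := ∀ (matrix : List (List Int)), Dom_doit_sort_dp matrix → Pre_doit_sort_dp matrix → Spec_doit_sort_dp matrix (doit_sort_dp matrix)
-- ===== LEMMAS AND PROOFS =====

-- countP (h ≤ ·) splits into countP (h < ·) plus the multiplicity of h itself.
lemma countP_le_split (hs : List Int) (h : Int) :
    hs.countP (fun x => decide (h ≤ x)) = hs.countP (fun x => decide (h < x)) + hs.count h := by
  induction hs with
  | nil => simp
  | cons y t ih =>
    by_cases hy : y = h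
    · subst hy
      simp [List.count_cons, ih]
      omega
    · rcases lt_or_ge h y with hlt | hle
      · simp [List.countP_cons, List.count_cons, ih, le_of_lt hlt, hlt, hy]
        omega
      · have h1 : ¬ h ≤ y := by omega
        have h2 : ¬ h < y := by omega
        simp [List.countP_cons, List.count_cons, ih, h1, h2, hy]

-- A's heights-update loop (in-place assignment over range(n)) equals B's zip comprehension.
lemma upd_aux (l row : List Int) (hr : l.length ≤ row.length) :
    ∀ k, k ≤ l.length →
    (PySem.List.pyRange 0 (k : Int) 1).foldl
      (fun hts j =>
        hts.set j.toNat (if PySem.List.pyGetD row j 0 == 1 then PySem.List.pyGetD hts j 0 + 1 else 0))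
      l
    = (List.range k).map
        (fun (j : Nat) => if PySem.List.pyGetD row (j : Int) 0 == 1 then PySem.List.pyGetD l (j : Int) 0 + 1 else 0)
      ++ l.drop k := by
  intro k
  induction k with
  | zero => intro _; simp [PySem.List.pyRange_one_eq_nil (le_refl (0 : Int))]
  | succ k ih =>
    intro hk1
    have hk : k ≤ l.length := Nat.le_of_succ_le hk1
    have hkl : k < l.length := hk1
    have hkr : k < row.length := lt_of_lt_of_le hkl hr
    have hcast : ((k + 1 : Nat) : Int) = (k : Int) + 1 := by push_cast; ring
    rw [hcast, PySem.List.pyRange_one_succ_right (by positivity), List.foldl_append, ih hk]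
    simp only [List.foldl_cons, List.foldl_nil]
    have hmaplen : ((List.range k).map
        (fun (j : Nat) => if PySem.List.pyGetD row (j : Int) 0 == 1 then PySem.List.pyGetD l (j : Int) 0 + 1 else 0)).length = k := by
      simp
    have hgetc : PySem.List.pyGetD
        ((List.range k).map
          (fun (j : Nat) => if PySem.List.pyGetD row (j : Int) 0 == 1 then PySem.List.pyGetD l (j : Int) 0 + 1 else 0)
          ++ l.drop k) ((k : Int)) 0 = l[k] := by
      rw [PySem.List.pyGetD_natCast]
      rw [List.getD_eq_getElem _ _ (by simp only [List.length_append, List.length_map, List.length_range, List.length_drop]; omega)]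
      rw [List.getElem_append_right (le_of_eq hmaplen)]
      simp only [hmaplen, Nat.sub_self, List.getElem_drop]
      simp
    rw [hgetc]
    rw [List.set_append]
    simp only [hmaplen, Int.toNat_natCast, lt_irrefl, if_false, Nat.sub_self]
    rw [List.drop_eq_getElem_cons hkl, List.set_cons_zero]
    rw [List.range_succ, List.map_append]
    have hgl : PySem.List.pyGetD l ((k : Int)) 0 = l[k] := by
      rw [PySem.List.pyGetD_natCast, List.getD_eq_getElem _ _ hkl]
    simp [hgl, List.getElem?_eq_getElem hkl]

lemma upd_eq (l row : List Int) (n : Nat) (hn : l.length = n) (hr : n ≤ row.length) :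
    (PySem.List.pyRange 0 (n : Int) 1).foldl
      (fun hts j =>
        hts.set j.toNat (if PySem.List.pyGetD row j 0 == 1 then PySem.List.pyGetD hts j 0 + 1 else 0))
      l
    = (l.zip row).map (fun p => if p.2 == 1 then p.1 + 1 else 0) := by
  subst hn
  rw [upd_aux l row hr l.length le_rfl]
  apply List.ext_getElem
  · simp
    omega
  · intro j h1 h2
    have hj : j < l.length := by simpa using h1
    have hjr : j < row.length := lt_of_lt_of_le hj hr
    simp only [List.getElem_append_left, List.getElem_map, List.getElem_range, List.getElem_zip,
      List.drop_length, List.append_nil]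
    rw [PySem.List.pyGetD_natCast, PySem.List.pyGetD_natCast,
      List.getD_eq_getElem _ _ hjr, List.getD_eq_getElem _ _ hj]

-- B's countdown scan: the running k equals the count of heights ≥ current bound.
lemma bscan (hs : List Int) : ∀ (c : Nat) (a : Int),
    ((PySem.List.pyRange (c : Int) 0 (-1)).foldl
      (fun (s : Int × Int) h =>
        (s.1 + (hs.count h : Int), max s.2 (h * (s.1 + (hs.count h : Int)))))
      ((hs.countP (fun x => decide ((c : Int) < x)) : Int), a)).2
    = ((PySem.List.pyRange (c : Int) 0 (-1)).map
        (fun h => h * (hs.countP (fun x => decide (h ≤ x)) : Int))).foldl max a := by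
  intro c
  induction c with
  | zero =>
    intro a
    simp only [Nat.cast_zero]
    rw [PySem.List.pyRange_neg_one_eq_nil (le_refl (0 : Int))]
    rfl
  | succ c ih =>
    intro a
    have hc1 : ((c + 1 : Nat) : Int) = (c : Int) + 1 := by push_cast; ring
    rw [hc1, PySem.List.pyRange_neg_one_cons (by positivity)]
    have hsub : ((c : Int) + 1 - 1) = (c : Int) := by ring
    rw [hsub]
    simp only [List.foldl_cons, List.map_cons]
    have e1 : hs.countP (fun x => decide ((c : Int) < x))
        = hs.countP (fun x => decide ((c : Int) + 1 ≤ x)) := by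
      apply List.countP_congr
      intro x _
      constructor <;> intro h <;> simp_all <;> omega
    have e2 := countP_le_split hs ((c : Int) + 1)
    have hEq : (hs.countP (fun x => decide ((c : Int) + 1 < x)) : Int) + (hs.count ((c : Int) + 1) : Int)
        = (hs.countP (fun x => decide ((c : Int) < x)) : Int) := by
      rw [e1]
      exact_mod_cast e2.symm
    rw [← e1] at *
    rw [hEq]
    exact ih (max a (((c : Int) + 1) * (hs.countP (fun x => decide ((c : Int) < x)) : Int)))

-- monotone access in a Pairwise-(≤) list
lemma pairwise_mono (S : List Int) (hpw : S.Pairwise (fun a b => a ≤ b)) {p q : Nat}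
    (hpq : p ≤ q) (hq : q < S.length) : S[p]'(lt_of_le_of_lt hpq hq) ≤ S[q] := by
  rcases eq_or_lt_of_le hpq with rfl | hlt
  · exact le_refl _
  · exact List.pairwise_iff_getElem.mp hpw p q (lt_of_le_of_lt hpq hq) hq hlt

-- In a sorted list S, at least len-i elements are ≥ S[i].
lemma sorted_tail_count (S : List Int) (hpw : S.Pairwise (fun a b => a ≤ b)) (i : Nat)
    (hi : i < S.length) :
    ((S.length : Int) - (i : Int))
      ≤ (S.countP (fun x => decide (S[i] ≤ x)) : Int) := by
  have hcnt : (S.drop i).countP (fun x => decide (S[i] ≤ x)) = (S.drop i).length := by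
    rw [List.countP_eq_length]
    intro x hx
    obtain ⟨j, hj, rfl⟩ := List.mem_iff_getElem.mp hx
    have hlend : (S.drop i).length = S.length - i := List.length_drop
    have hij : i + j < S.length := by omega
    rw [List.getElem_drop]
    simpa using pairwise_mono S hpw (Nat.le_add_right i j) hij
  have hle := List.Sublist.countP_le (p := fun x => decide (S[i] ≤ x)) (List.drop_sublist i S)
  have hlend : (S.drop i).length = S.length - i := List.length_drop
  omega

-- If K elements of the sorted list S are ≥ h and K > 0 then S[len-K] ≥ h.
lemma sorted_pivot (S : List Int) (hpw : S.Pairwise (fun a b => a ≤ b)) (h : Int)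
    (hK : 0 < S.countP (fun x => decide (h ≤ x))) :
    h ≤ S.getD (S.length - S.countP (fun x => decide (h ≤ x))) 0 := by
  set K := S.countP (fun x => decide (h ≤ x)) with hKdef
  have hKlen : K ≤ S.length := List.countP_le_length
  have hi : S.length - K < S.length := by omega
  rw [List.getD_eq_getElem _ _ hi]
  by_contra hlt
  push_neg at hlt
  set i := S.length - K with hidef
  have htake : (S.take (i + 1)).countP (fun x => decide (h ≤ x)) = 0 := by
    rw [List.countP_eq_zero]
    intro x hx
    obtain ⟨j, hj, rfl⟩ := List.mem_iff_getElem.mp hx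
    rw [List.getElem_take]
    have hji : j ≤ i := by
      have := hj
      simp only [List.length_take] at this
      omega
    have hmono := pairwise_mono S hpw hji hi
    simp only [decide_eq_true_eq]
    push_neg
    calc S[j] ≤ S[i] := hmono
      _ < h := hlt
  have hsplit : K = (S.take (i + 1)).countP (fun x => decide (h ≤ x))
      + (S.drop (i + 1)).countP (fun x => decide (h ≤ x)) := by
    rw [hKdef]
    conv_lhs => rw [← List.take_append_drop (i + 1) S, List.countP_append]
  have hdroplen : (S.drop (i + 1)).countP (fun x => decide (h ≤ x)) ≤ S.length - (i + 1) := by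
    calc (S.drop (i + 1)).countP (fun x => decide (h ≤ x)) ≤ (S.drop (i + 1)).length :=
          List.countP_le_length
      _ = S.length - (i + 1) := List.length_drop
  omega

-- the per-row core: max over positions of sorted heights = max over height values of h·count(≥h)
lemma row_core (hs : List Int) (a m : Int) (ha : 0 ≤ a)
    (hb : ∀ h ∈ hs, 0 ≤ h ∧ h ≤ m) :
    (PySem.List.pyRange 0 ((PySem.List.sorted hs (fun x => x) false).length : Int) 1).foldl
      (fun acc i => max acc (PySem.List.pyGetD (PySem.List.sorted hs (fun x => x) false) i 0
        * (((PySem.List.sorted hs (fun x => x) false).length : Int) - i)))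
      a
    = ((PySem.List.pyRange m 0 (-1)).map
        (fun h => h * (hs.countP (fun x => decide (h ≤ x)) : Int))).foldl max a := by
  rw [← List.foldl_map
    (f := fun i : Int => PySem.List.pyGetD (PySem.List.sorted hs (fun x => x) false) i 0
      * (((PySem.List.sorted hs (fun x => x) false).length : Int) - i))
    (g := max)]
  have hperm0 := PySem.List.sorted_perm hs (fun x => x) false
  have hpw0 := PySem.List.sorted_pairwise hs (fun x => x)
  generalize hSdef : PySem.List.sorted hs (fun x => x) false = S at *
  have hperm : S.Perm hs := hperm0
  have hpw : S.Pairwise (fun a b => a ≤ b) := hpw0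
  set LA := (PySem.List.pyRange 0 (S.length : Int) 1).map
    (fun i : Int => PySem.List.pyGetD S i 0 * ((S.length : Int) - i)) with hLA
  set LB := (PySem.List.pyRange m 0 (-1)).map
    (fun h => h * (hs.countP (fun x => decide (h ≤ x)) : Int)) with hLB
  apply le_antisymm
  · rcases PySem.List.foldl_max_mem LA a with hEq | hMem
    · rw [hEq]; exact (PySem.List.le_foldl_max LB a).1
    · rw [hLA] at hMem
      obtain ⟨i, hi, hfi⟩ := List.mem_map.mp hMem
      obtain ⟨h0i, h1i⟩ := PySem.List.mem_pyRange_one.mp hi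
      rw [← hfi]
      have hjlen : i.toNat < S.length := by omega
      have hgd : PySem.List.pyGetD S i 0 = S[i.toNat] := by
        rw [PySem.List.pyGetD_eq_getElem S 0 h0i h1i]
      have hmem : S[i.toNat] ∈ hs := hperm.mem_iff.mp (List.getElem_mem hjlen)
      obtain ⟨hge0, hlem⟩ := hb _ hmem
      rcases eq_or_lt_of_le hge0 with hz | hpos
      · have hzero : PySem.List.pyGetD S i 0 * ((S.length : Int) - i) = 0 := by
          rw [hgd, ← hz, zero_mul]
        rw [hzero]
        exact le_trans ha (PySem.List.le_foldl_max LB a).1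
      · have hmemB : S[i.toNat] * (hs.countP (fun x => decide (S[i.toNat] ≤ x)) : Int) ∈ LB := by
          rw [hLB]
          exact List.mem_map.mpr ⟨S[i.toNat], PySem.List.mem_pyRange_neg_one.mpr ⟨hpos, hlem⟩, rfl⟩
        have htail := sorted_tail_count S hpw i.toNat hjlen
        have hcP : S.countP (fun x => decide (S[i.toNat] ≤ x))
            = hs.countP (fun x => decide (S[i.toNat] ≤ x)) := hperm.countP_eq _
        rw [hcP] at htail
        have hle1 : PySem.List.pyGetD S i 0 * ((S.length : Int) - i)
            ≤ S[i.toNat] * (hs.countP (fun x => decide (S[i.toNat] ≤ x)) : Int) := by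
          rw [hgd]
          apply mul_le_mul_of_nonneg_left _ hge0
          have hti : ((i.toNat : Int)) = i := Int.toNat_of_nonneg h0i
          omega
        exact le_trans hle1 ((PySem.List.le_foldl_max LB a).2 _ hmemB)
  · rcases PySem.List.foldl_max_mem LB a with hEq | hMem
    · rw [hEq]; exact (PySem.List.le_foldl_max LA a).1
    · rw [hLB] at hMem
      obtain ⟨h, hh, hfh⟩ := List.mem_map.mp hMem
      obtain ⟨hpos, hle⟩ := PySem.List.mem_pyRange_neg_one.mp hh
      rw [← hfh]
      have hcP : S.countP (fun x => decide (h ≤ x)) = hs.countP (fun x => decide (h ≤ x)) :=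
        hperm.countP_eq _
      rcases Nat.eq_zero_or_pos (hs.countP (fun x => decide (h ≤ x))) with hK0 | hKpos
      · rw [hK0]
        simp only [Nat.cast_zero, mul_zero]
        exact le_trans ha (PySem.List.le_foldl_max LA a).1
      · have hKS : 0 < S.countP (fun x => decide (h ≤ x)) := by omega
        have hKlen : S.countP (fun x => decide (h ≤ x)) ≤ S.length := List.countP_le_length
        have hpiv := sorted_pivot S hpw h hKS
        have hi : S.length - S.countP (fun x => decide (h ≤ x)) < S.length := by omega
        rw [List.getD_eq_getElem _ _ hi] at hpiv
        set i := S.length - S.countP (fun x => decide (h ≤ x)) with hidef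
        have hmemA : PySem.List.pyGetD S ((i : Nat) : Int) 0 * ((S.length : Int) - ((i : Nat) : Int)) ∈ LA := by
          rw [hLA]
          exact List.mem_map.mpr ⟨((i : Nat) : Int),
            PySem.List.mem_pyRange_one.mpr ⟨by positivity, by exact_mod_cast hi⟩, rfl⟩
        have hgd : PySem.List.pyGetD S ((i : Nat) : Int) 0 = S[i] := by
          rw [PySem.List.pyGetD_natCast, List.getD_eq_getElem _ _ hi]
        have hle1 : h * (hs.countP (fun x => decide (h ≤ x)) : Int)
            ≤ PySem.List.pyGetD S ((i : Nat) : Int) 0 * ((S.length : Int) - ((i : Nat) : Int)) := by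
          rw [hgd]
          have hKi : ((S.length : Int) - ((i : Nat) : Int)) = (S.countP (fun x => decide (h ≤ x)) : Int) := by
            rw [hidef]
            push_cast
            omega
          rw [hKi, hcP]
          exact mul_le_mul_of_nonneg_right hpiv (by positivity)
        exact le_trans hle1 ((PySem.List.le_foldl_max LA a).2 _ hmemA)

-- per-row equality of the two ans updates
lemma row_eq (hs : List Int) (a m : Int) (ha : 0 ≤ a) (hm : 0 ≤ m)
    (hb : ∀ h ∈ hs, 0 ≤ h ∧ h ≤ m) :
    (PySem.List.pyRange 0 ((PySem.List.sorted hs (fun x => x) false).length : Int) 1).foldl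
      (fun acc i => max acc (PySem.List.pyGetD (PySem.List.sorted hs (fun x => x) false) i 0
        * (((PySem.List.sorted hs (fun x => x) false).length : Int) - i)))
      a
    = ((PySem.List.pyRange m 0 (-1)).foldl
        (fun (s : Int × Int) h =>
          let k := s.1 + (hs.foldl (fun d h => d.insert h (d.getD h 0 + 1)) (PySem.Dict.empty)).getD h 0
          (k, max s.2 (h * k)))
        (0, a)).2 := by
  obtain ⟨c, rfl⟩ : ∃ c : Nat, m = (c : Int) := ⟨m.toNat, (Int.toNat_of_nonneg hm).symm⟩
  rw [row_core hs a (c : Int) ha hb]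
  have hfreq : ∀ h : Int,
      (hs.foldl (fun d h => d.insert h (d.getD h 0 + 1)) (PySem.Dict.empty)).getD h 0
        = (hs.count h : Int) := by
    intro h
    rw [PySem.Dict.getD_foldl_insert_add_one]
    simp [PySem.Dict.getD_empty]
  simp only [hfreq]
  have h0 : ((0 : Int), a) = (((hs.countP (fun x => decide ((c : Int) < x)) : Nat) : Int), a) := by
    have : hs.countP (fun x => decide ((c : Int) < x)) = 0 := by
      rw [List.countP_eq_zero]
      intro x hx
      have := (hb x hx).2
      simp only [decide_eq_true_eq]
      omega
    rw [this]
    norm_num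
  rw [h0, bscan hs c a]

-- the main fold invariant over the rows
lemma main_fold (n : Nat) (m : Int) (hm : 0 ≤ m) :
    ∀ (rows : List (List Int)) (hts : List Int) (a : Int),
    hts.length = n → 0 ≤ a →
    (∀ h ∈ hts, 0 ≤ h ∧ h + rows.length ≤ m) →
    (∀ row ∈ rows, n ≤ row.length) →
    (rows.foldl
      (fun (st : List Int × Int) row =>
        let heights := (PySem.List.pyRange 0 (n : Int) 1).foldl
          (fun hts j =>
            hts.set j.toNat (if PySem.List.pyGetD row j 0 == 1 then PySem.List.pyGetD hts j 0 + 1 else 0))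
          st.1
        let cnt := PySem.List.sorted heights (fun x => x) false
        let ans := (PySem.List.pyRange 0 (cnt.length : Int) 1).foldl
          (fun a i => max a (PySem.List.pyGetD cnt i 0 * ((cnt.length : Int) - i)))
          st.2
        (heights, ans))
      (hts, a)).2
    = (rows.foldl
      (fun (st : List Int × Int) row =>
        let heights := (st.1.zip row).map (fun p => if p.2 == 1 then p.1 + 1 else 0)
        let freq := heights.foldl (fun d h => d.insert h (d.getD h 0 + 1)) (PySem.Dict.empty)
        let ka := (PySem.List.pyRange m 0 (-1)).foldl
          (fun (s : Int × Int) h =>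
            let k := s.1 + freq.getD h 0
            (k, max s.2 (h * k)))
          (0, st.2)
        (heights, ka.2))
      (hts, a)).2 := by
  intro rows
  induction rows with
  | nil => intro hts a _ _ _ _; rfl
  | cons row rs ih =>
    intro hts a hlen ha hb hrowlen
    have hrl : n ≤ row.length := hrowlen row (by simp)
    simp only [List.foldl_cons]
    rw [upd_eq hts row n hlen hrl]
    have hbH : ∀ h ∈ (hts.zip row).map (fun p => if p.2 == 1 then p.1 + 1 else 0),
        0 ≤ h ∧ h + (rs.length : Int) ≤ m := by
      intro h hh
      simp only [List.mem_map] at hh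
      obtain ⟨p, hp, rfl⟩ := hh
      have hp1 := (List.of_mem_zip hp).1
      have := hb p.1 hp1
      simp only [List.length_cons] at this
      by_cases hc : (p.2 == 1) = true <;>
        simp only [hc, if_true, if_false] <;> push_cast at this ⊢ <;>
        exact ⟨by first | trivial | omega, by omega⟩
    have hbH' : ∀ h ∈ (hts.zip row).map (fun p => if p.2 == 1 then p.1 + 1 else 0),
        0 ≤ h ∧ h ≤ m := by
      intro h hh
      have h1 := hbH h hh
      have h2 : (0:Int) ≤ (rs.length : Int) := by positivity
      omega
    have haA : 0 ≤ (PySem.List.pyRange 0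
        (((PySem.List.sorted ((hts.zip row).map (fun p => if p.2 == 1 then p.1 + 1 else 0)) (fun x => x) false)).length : Int) 1).foldl
        (fun acc i => max acc (PySem.List.pyGetD (PySem.List.sorted ((hts.zip row).map (fun p => if p.2 == 1 then p.1 + 1 else 0)) (fun x => x) false) i 0
          * (((PySem.List.sorted ((hts.zip row).map (fun p => if p.2 == 1 then p.1 + 1 else 0)) (fun x => x) false).length : Int) - i)))
        a := by
      exact le_trans ha (PySem.List.le_foldl_max_int _ _ _).1
    rw [row_eq _ a m ha hm hbH'] at haA ⊢
    apply ih
    · simp [List.length_zip]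
      omega
    · exact haA
    · exact hbH
    · intro r hr
      exact hrowlen r (by simp [hr])

-- ===== VERDICT (by name: the statement is the Claim_ definition above) =====
theorem doit_sort_dp_spec : Claim_equal_doit_sort_dp := by
  intro matrix _ hpre
  obtain ⟨hne, hrows⟩ := hpre
  unfold Spec_doit_sort_dp doit_sort_dp doit_sort_dp_alt
  simp only []
  rw [PySem.List.foldl_pyRange_zero_pyGetD' matrix ([] : List Int)
    (fun (st : List Int × Int) (row : List Int) =>
      let heights := (PySem.List.pyRange 0 ((PySem.List.pyGetD matrix 0 []).length : Int) 1).foldl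
        (fun hts j =>
          hts.set j.toNat (if PySem.List.pyGetD row j 0 == 1 then PySem.List.pyGetD hts j 0 + 1 else 0))
        st.1
      let cnt := PySem.List.sorted heights (fun x => x) false
      let ans := (PySem.List.pyRange 0 (cnt.length : Int) 1).foldl
        (fun a i => max a (PySem.List.pyGetD cnt i 0 * ((cnt.length : Int) - i)))
        st.2
      (heights, ans))
    (List.replicate (PySem.List.pyGetD matrix 0 []).length 0, 0)]
  apply main_fold
  · positivity
  · simp
  · exact le_rfl
  · intro h hh
    simp at hh
    omega
  · intro row hrow
    have := hrows row hrow
    have h0 : PySem.List.pyGetD matrix 0 [] = matrix.headD [] := by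
      rw [PySem.List.pyGetD_of_nonneg matrix ([] : List Int) le_rfl]
      cases matrix <;> simp
    rw [h0]
    exact this
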